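-- pv_equiv track=rewrite | github.com/Neeraja0613/codemind-python | array_splitting.py | solution
-- ===== SOURCE A (Python) =====
-- def solution(numbers):
--     first = [numbers[0]]
--     second = [numbers[1]]
--     for i in range(2, len(numbers)):
--         x = numbers[i]
--         count_first = sum(1 for a in first if a > x)
--         count_second = sum(1 for b in second if b > x)
--         if count_first > count_second:
--             first.append(x)
--             continue
--         elif count_second > count_first:
--             second.append(x)
--             continue
--         if len(first) < len(second):
--             first.append(x)
--             continue
--         elif len(second) < len(first):
--             second.append(x)
--             continue
--         first.append(x)
--     return first + second
-- ===== SOURCE B (Python) =====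
-- def solution(numbers):
--     # Same greedy split, but each side keeps a sorted copy: "how many are
--     # greater than x" becomes a binary search instead of a full scan, and the
--     # original insertion order is reconstructed at the end from recorded flags.
--     def bisect_right(a, x):
--         lo, hi = 0, len(a)
--         while lo < hi:
--             mid = (lo + hi) // 2
--             if x < a[mid]:
--                 hi = mid
--             else:
--                 lo = mid + 1
--         return lo
--
--     take_first = [True, False]
--     s1 = [numbers[0]]
--     s2 = [numbers[1]]
--     for x in numbers[2:]:
--         c1 = len(s1) - bisect_right(s1, x)
--         c2 = len(s2) - bisect_right(s2, x)
--         if c1 > c2 or (c1 == c2 and len(s1) <= len(s2)):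
--             take_first.append(True)
--             s1.insert(bisect_right(s1, x), x)
--         else:
--             take_first.append(False)
--             s2.insert(bisect_right(s2, x), x)
--     return [x for x, f in zip(numbers, take_first) if f] + \
--            [x for x, f in zip(numbers, take_first) if not f]
-- ===== Notes on version B (the rewrite author's own statement) =====
-- stated objective: faster
-- what changed: B keeps a sorted copy of each side and answers the count-greater query by binary search (len - bisect_right) with sorted insertion, recording a per-element side flag and reconstructing the two insertion-order lists at the end, instead of A's full linear scan of both lists at every step.
import Mathlib
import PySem

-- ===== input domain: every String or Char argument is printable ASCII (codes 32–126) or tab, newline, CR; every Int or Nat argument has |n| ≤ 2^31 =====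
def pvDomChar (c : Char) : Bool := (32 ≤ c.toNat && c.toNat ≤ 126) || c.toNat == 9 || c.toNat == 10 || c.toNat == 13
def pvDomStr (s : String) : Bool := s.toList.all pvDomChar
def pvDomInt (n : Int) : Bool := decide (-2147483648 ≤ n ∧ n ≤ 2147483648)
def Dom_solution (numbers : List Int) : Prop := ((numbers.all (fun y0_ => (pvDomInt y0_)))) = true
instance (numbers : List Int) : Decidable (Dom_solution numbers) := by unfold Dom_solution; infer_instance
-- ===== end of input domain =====

-- B replaces A's per-step linear scans by binary search over sorted side copies,
-- recording side flags and rebuilding the insertion-order lists at the end (faster in a timing run's mechanism: fewer comparisons).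

-- ===== PORT A =====
-- one loop iteration of A: counts-greater by scanning both lists, then the branch chain
def solutionStepA (st : List Int × List Int) (x : Int) : List Int × List Int :=
  let first := st.1
  let second := st.2
  let c1 := first.countP (fun a => decide (x < a))
  let c2 := second.countP (fun b => decide (x < b))
  if c2 < c1 then (first ++ [x], second)
  else if c1 < c2 then (first, second ++ [x])
  else if first.length < second.length then (first ++ [x], second)
  else if second.length < first.length then (first, second ++ [x])
  else (first ++ [x], second)

def solution (numbers : List Int) : List Int :=
  match numbers with
  | a :: b :: rest =>
      let st := rest.foldl solutionStepA ([a], [b])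
      st.1 ++ st.2
  | _ => []  -- Python raises IndexError here; excluded by Pre_solution

-- ===== PORT B =====
-- Source B's hand-written bisect_right loop; a[mid] is always in range while lo < hi ≤ len, so pyGetD is exact
def bisectRightGo (a : List Int) (x : Int) (lo hi : Int) : Int :=
  if h : lo < hi then
    let mid := PySem.Int.floordiv (lo + hi) 2
    if x < PySem.List.pyGetD a mid 0 then bisectRightGo a x lo mid
    else bisectRightGo a x (mid + 1) hi
  else lo
termination_by (hi - lo).toNat
decreasing_by
  · have := PySem.Int.floordiv_two_mid_bounds (le_of_lt h)
    have h2 : PySem.Int.floordiv (lo + hi) 2 < hi := by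
      rw [PySem.Int.floordiv_lt_iff_lt_mul (by norm_num)]; omega
    omega
  · have := PySem.Int.floordiv_two_mid_bounds (le_of_lt h)
    omega

def bisectRight (a : List Int) (x : Int) : Int := bisectRightGo a x 0 a.length

-- one loop iteration of B on state (flags, sorted side 1, sorted side 2)
def solutionStepB (st : List Bool × List Int × List Int) (x : Int) :
    List Bool × List Int × List Int :=
  let flags := st.1
  let s1 := st.2.1
  let s2 := st.2.2
  let c1 : Int := s1.length - bisectRight s1 x
  let c2 : Int := s2.length - bisectRight s2 x
  if c2 < c1 ∨ (c1 = c2 ∧ s1.length ≤ s2.length) then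
    (flags ++ [true], PySem.List.insert s1 (bisectRight s1 x) x, s2)
  else
    (flags ++ [false], s1, PySem.List.insert s2 (bisectRight s2 x) x)

def solution_alt (numbers : List Int) : List Int :=
  match numbers with
  | [] => []  -- Python raises IndexError here; excluded by Pre_solution
  | [_] => []  -- Python raises IndexError here; excluded by Pre_solution
  | a :: b :: rest =>
      let st := rest.foldl solutionStepB ([true, false], [a], [b])
      ((numbers.zip st.1).filter (fun p => p.2)).map Prod.fst ++
      ((numbers.zip st.1).filter (fun p => !p.2)).map Prod.fst

-- ===== PRECONDITION & SPEC =====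
-- Pre_ excludes lists with fewer than 2 elements, on which both Pythons raise IndexError.
def Pre_solution (numbers : List Int) : Prop := 2 ≤ numbers.length
instance (numbers : List Int) : Decidable (Pre_solution numbers) := by unfold Pre_solution; infer_instance
def pvWitness_solution : List Int := ([3, 1, 2, 2, 5] : List Int)

def Spec_solution (numbers : List Int) (out : List Int) : Prop := out = solution_alt numbers
instance (numbers : List Int) (out : List Int) : Decidable (Spec_solution numbers out) := by unfold Spec_solution; infer_instance

-- ===== CLAIM (what is proved, stated in full; the proofs are below) =====
def Claim_equal_solution : Prop := ∀ (numbers : List Int), Dom_solution numbers → Pre_solution numbers → Spec_solution numbers (solution numbers)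

-- ===== LEMMAS AND PROOFS =====

theorem countP_eq_k (a : List Int) (p : Int → Bool) (k : Nat) (hk : k ≤ a.length)
    (h1 : ∀ i (h : i < a.length), i < k → p a[i])
    (h2 : ∀ i (h : i < a.length), k ≤ i → ¬ p a[i]) :
    a.countP p = k := by
  conv_lhs => rw [← List.take_append_drop k a]
  rw [List.countP_append]
  have ht : (a.take k).countP p = (a.take k).length := by
    rw [List.countP_eq_length]
    intro y hy
    rw [List.mem_iff_getElem] at hy
    obtain ⟨i, hi, rfl⟩ := hy
    rw [List.getElem_take]
    exact h1 _ (by simp at hi; omega) (by simp at hi; omega)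
  have hd : (a.drop k).countP p = 0 := by
    rw [List.countP_eq_zero]
    intro y hy
    rw [List.mem_iff_getElem] at hy
    obtain ⟨i, hi, rfl⟩ := hy
    rw [List.getElem_drop]
    exact h2 _ (by simp at hi; omega) (by omega)
  rw [ht, hd, List.length_take]
  omega

theorem bisectGo_correct (n : Nat) (a : List Int) (x : Int) (lo hi : Int)
    (hn : (hi - lo).toNat ≤ n) (h0 : 0 ≤ lo) (hlh : lo ≤ hi) (hha : hi ≤ a.length)
    (hbelow : ∀ i (h : i < a.length), (i : Int) < lo → a[i] ≤ x)
    (habove : ∀ i (h : i < a.length), hi ≤ (i : Int) → x < a[i])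
    (hs : a.Pairwise (· ≤ ·)) :
    bisectRightGo a x lo hi = (a.countP (fun y => decide (y ≤ x)) : Int) := by
  induction n generalizing lo hi with
  | zero =>
    rw [bisectRightGo, dif_neg (by omega : ¬ lo < hi)]
    have hk : a.countP (fun y => decide (y ≤ x)) = lo.toNat := by
      apply countP_eq_k _ _ _ (by omega)
      · intro i hi hik
        simpa using hbelow i hi (by omega)
      · intro i hi hik
        simpa using not_le.mpr ( (habove i hi (by omega)))
    rw [hk]
    omega
  | succ m ih =>
    by_cases h : lo < hi
    · have hb := PySem.Int.floordiv_two_mid_bounds (hlh)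
      have hmlt : PySem.Int.floordiv (lo + hi) 2 < hi := by
        rw [PySem.Int.floordiv_lt_iff_lt_mul (by norm_num)]; omega
      set mid := PySem.Int.floordiv (lo + hi) 2 with hmid
      have hmr : mid.toNat < a.length := by omega
      have hget : PySem.List.pyGetD a mid 0 = a[mid.toNat] := by
        apply PySem.List.pyGetD_eq_getElem <;> omega
      rw [bisectRightGo]
      simp only [← hmid, dif_pos h, hget]
      have hsg := List.pairwise_iff_getElem.mp hs
      by_cases hx : x < a[mid.toNat]
      · rw [if_pos hx]
        apply ih lo mid (by omega) h0 (by omega) (by omega) hbelow _ 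
        intro i hil hmi
        by_cases hih : hi ≤ (i : Int)
        · exact habove i hil hih
        · rcases eq_or_lt_of_le hmi with he | hlt
          · have heq : mid.toNat = i := by omega
            simpa [← heq] using hx
          · calc x < a[mid.toNat] := hx
              _ ≤ a[i] := hsg _ _ hmr hil (by omega)
      · rw [if_neg hx]
        rw [not_lt] at hx
        apply ih (mid + 1) hi (by omega) (by omega) (by omega) hha _ habove
        intro i hil hmi
        rcases lt_or_ge (i : Int) lo with hlo | hge
        · exact hbelow i hil hlo
        · rcases Nat.lt_or_ge i mid.toNat with hlt | hgem
          · calc a[i] ≤ a[mid.toNat] := hsg _ _ hil hmr hlt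
              _ ≤ x := hx
          · have heq : i = mid.toNat := by omega
            simpa [heq] using hx
    · rw [bisectRightGo, dif_neg h]
      have hk : a.countP (fun y => decide (y ≤ x)) = lo.toNat := by
        apply countP_eq_k _ _ _ (by omega)
        · intro i hi hik
          simpa using hbelow i hi (by omega)
        · intro i hi hik
          simpa using not_le.mpr ( (habove i hi (by omega)))
      rw [hk]
      omega


theorem sorted_countP_takeWhile (x : Int) (a : List Int) (hs : a.Pairwise (· ≤ ·)) :
    a.countP (fun y => decide (y ≤ x)) = (a.takeWhile (fun y => decide (y ≤ x))).length := by
  induction a with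
  | nil => simp
  | cons y t ih =>
    rw [List.pairwise_cons] at hs
    by_cases hy : y ≤ x
    · rw [List.countP_cons_of_pos (p := fun y => decide (y ≤ x)) (by simpa using hy), List.takeWhile_cons_of_pos (by simpa using hy)]
      simp [ih hs.2]
    · rw [List.countP_cons_of_neg (p := fun y => decide (y ≤ x)) (by simpa using hy), List.takeWhile_cons_of_neg (by simpa using hy)]
      simp only [List.length_nil]
      rw [List.countP_eq_zero]
      intro z hz
      have : y ≤ z := hs.1 z hz
      simp; omega

theorem pins_sorted (x : Int) (a : List Int) (hs : a.Pairwise (· ≤ ·)) :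
    (a.takeWhile (fun y => decide (y ≤ x)) ++ x :: a.dropWhile (fun y => decide (y ≤ x))).Pairwise (· ≤ ·) := by
  induction a with
  | nil => simp
  | cons y t ih =>
    rw [List.pairwise_cons] at hs
    by_cases hy : y ≤ x
    · rw [List.takeWhile_cons_of_pos (by simpa using hy), List.dropWhile_cons_of_pos (by simpa using hy)]
      rw [List.cons_append, List.pairwise_cons]
      refine ⟨?_, ih hs.2⟩
      intro z hz
      simp only [List.mem_append, List.mem_cons] at hz
      rcases hz with h1 | h2 | h3
      · exact hs.1 z (List.IsPrefix.mem h1 (List.takeWhile_prefix _))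
      · omega
      · exact hs.1 z (List.IsSuffix.mem h3 (List.dropWhile_suffix _))
    · rw [List.takeWhile_cons_of_neg (by simpa using hy), List.dropWhile_cons_of_neg (by simpa using hy)]
      rw [List.nil_append, List.pairwise_cons]
      refine ⟨?_, List.pairwise_cons.mpr hs⟩
      intro z hz
      simp only [List.mem_cons] at hz
      rcases hz with rfl | hz
      · omega
      · have := hs.1 z hz; omega

theorem pins_perm (x : Int) (a : List Int) :
    (a.takeWhile (fun y => decide (y ≤ x)) ++ x :: a.dropWhile (fun y => decide (y ≤ x))).Perm (x :: a) := by
  have := List.perm_middle (a := x) (l₁ := a.takeWhile (fun y => decide (y ≤ x))) (l₂ := a.dropWhile (fun y => decide (y ≤ x)))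
  simpa [List.takeWhile_append_dropWhile] using this

theorem countP_gt_eq (x : Int) (a : List Int) :
    (a.countP (fun y => decide (x < y)) : Int) = (a.length : Int) - (a.countP (fun y => decide (y ≤ x)) : Int) := by
  have h := List.length_eq_countP_add_countP (fun y => decide (y ≤ x)) (l := a)
  have h2 : a.countP (fun y => decide (x < y)) = a.countP (fun y => decide ¬(decide (y ≤ x) = true)) := by
    apply List.countP_congr
    intro z _
    simp
  omega

theorem bisect_correct (a : List Int) (x : Int) (hs : a.Pairwise (· ≤ ·)) :
    bisectRight a x = (a.countP (fun y => decide (y ≤ x)) : Int) := by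
  unfold bisectRight
  apply bisectGo_correct a.length a x 0 a.length (by simp) (by omega) (by omega) (by omega)
  · intro i h hi
    exact absurd hi (by omega)
  · intro i h hi
    exact absurd hi (by omega)
  · exact hs

theorem insert_eq_pins (a : List Int) (x : Int) (hs : a.Pairwise (· ≤ ·)) :
    PySem.List.insert a (bisectRight a x) x
      = a.takeWhile (fun y => decide (y ≤ x)) ++ x :: a.dropWhile (fun y => decide (y ≤ x)) := by
  rw [bisect_correct a x hs, sorted_countP_takeWhile x a hs]
  rw [PySem.List.insert_natCast a _ x (by
    conv_rhs => rw [← List.takeWhile_append_dropWhile (p := fun y => decide (y ≤ x)) (l := a)]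
    rw [List.length_append]
    omega)]
  congr 1
  · exact (List.prefix_iff_eq_take.mp (List.takeWhile_prefix _)).symm
  · congr 1
    have hsp : a.drop (a.takeWhile (fun y => decide (y ≤ x))).length
        = ((a.takeWhile (fun y => decide (y ≤ x))) ++ (a.dropWhile (fun y => decide (y ≤ x)))).drop
            (a.takeWhile (fun y => decide (y ≤ x))).length := by
      rw [List.takeWhile_append_dropWhile]
    rw [hsp, List.drop_left]

-- the loop invariant tying A's state to B's state after processing `pre`
def LoopInv (stA : List Int × List Int) (stB : List Bool × List Int × List Int) (pre : List Int) : Prop :=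
  stB.2.1.Perm stA.1 ∧ stB.2.2.Perm stA.2 ∧
  stB.2.1.Pairwise (· ≤ ·) ∧ stB.2.2.Pairwise (· ≤ ·) ∧
  stB.1.length = pre.length ∧
  stA.1 = ((pre.zip stB.1).filter (fun p => p.2)).map Prod.fst ∧
  stA.2 = ((pre.zip stB.1).filter (fun p => !p.2)).map Prod.fst

theorem zip_snoc (pre : List Int) (fl : List Bool) (x : Int) (b : Bool)
    (hlen : fl.length = pre.length) :
    (pre ++ [x]).zip (fl ++ [b]) = pre.zip fl ++ [(x, b)] :=
  List.zip_append hlen.symm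

theorem insert_perm_snoc (s1 f : List Int) (x : Int) (hp : s1.Perm f)
    (hs : s1.Pairwise (· ≤ ·)) :
    (PySem.List.insert s1 (bisectRight s1 x) x).Perm (f ++ [x]) := by
  rw [insert_eq_pins s1 x hs]
  exact (pins_perm x s1).trans ((hp.cons x).trans (List.perm_append_singleton x f).symm)

theorem insert_sorted (s1 : List Int) (x : Int) (hs : s1.Pairwise (· ≤ ·)) :
    (PySem.List.insert s1 (bisectRight s1 x) x).Pairwise (· ≤ ·) := by
  rw [insert_eq_pins s1 x hs]
  exact pins_sorted x s1 hs

theorem step_inv (stA : List Int × List Int) (stB : List Bool × List Int × List Int)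
    (pre : List Int) (x : Int) (h : LoopInv stA stB pre) :
    LoopInv (solutionStepA stA x) (solutionStepB stB x) (pre ++ [x]) := by
  obtain ⟨f, s⟩ := stA
  obtain ⟨fl, s1, s2⟩ := stB
  obtain ⟨hp1, hp2, hs1, hs2, hlen, hf, hsnd⟩ := h
  simp only [LoopInv] at *
  have e1 : (s1.length : Int) - bisectRight s1 x = (f.countP (fun a => decide (x < a)) : Int) := by
    have hgt := countP_gt_eq x f
    rw [bisect_correct s1 x hs1, hp1.countP_eq, hp1.length_eq]
    omega
  have e2 : (s2.length : Int) - bisectRight s2 x = (s.countP (fun b => decide (x < b)) : Int) := by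
    have hgt := countP_gt_eq x s
    rw [bisect_correct s2 x hs2, hp2.countP_eq, hp2.length_eq]
    omega
  have hl1 : s1.length = f.length := hp1.length_eq
  have hl2 : s2.length = s.length := hp2.length_eq
  by_cases hc : s.countP (fun b => decide (x < b)) < f.countP (fun a => decide (x < a))
      ∨ (f.countP (fun a => decide (x < a)) = s.countP (fun b => decide (x < b)) ∧ f.length ≤ s.length)
  · -- both go to the first list
    have hBc : ((s2.length : Int) - bisectRight s2 x < (s1.length : Int) - bisectRight s1 x)
        ∨ ((s1.length : Int) - bisectRight s1 x = (s2.length : Int) - bisectRight s2 x ∧ s1.length ≤ s2.length) := by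
      rw [e1, e2, hl1, hl2]
      omega
    have hA : solutionStepA (f, s) x = (f ++ [x], s) := by
      simp only [solutionStepA]
      rcases hc with hlt | ⟨heq, hle⟩
      · rw [if_pos hlt]
      · rw [if_neg (by omega), if_neg (by omega)]
        by_cases hsz : f.length < s.length
        · rw [if_pos hsz]
        · rw [if_neg hsz, if_neg (by omega)]
    have hB : solutionStepB (fl, s1, s2) x
        = (fl ++ [true], PySem.List.insert s1 (bisectRight s1 x) x, s2) := by
      simp only [solutionStepB]
      rw [if_pos hBc]
    rw [hA, hB]
    refine ⟨insert_perm_snoc s1 f x hp1 hs1, hp2, insert_sorted s1 x hs1, hs2, by simp [hlen], ?_, ?_⟩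
    · rw [zip_snoc pre fl x true hlen, List.filter_append, List.map_append]
      simp [← hf]
    · rw [zip_snoc pre fl x true hlen, List.filter_append, List.map_append]
      simp [← hsnd]
  · -- both go to the second list
    have hBc : ¬ (((s2.length : Int) - bisectRight s2 x < (s1.length : Int) - bisectRight s1 x)
        ∨ ((s1.length : Int) - bisectRight s1 x = (s2.length : Int) - bisectRight s2 x ∧ s1.length ≤ s2.length)) := by
      rw [e1, e2, hl1, hl2]
      omega
    have hA : solutionStepA (f, s) x = (f, s ++ [x]) := by
      simp only [solutionStepA]
      by_cases hlt : f.countP (fun a => decide (x < a)) < s.countP (fun b => decide (x < b))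
      · rw [if_neg (by omega), if_pos hlt]
      · rw [if_neg (by omega), if_neg hlt, if_neg (by omega), if_pos (by omega)]
    have hB : solutionStepB (fl, s1, s2) x
        = (fl ++ [false], s1, PySem.List.insert s2 (bisectRight s2 x) x) := by
      simp only [solutionStepB]
      rw [if_neg hBc]
    rw [hA, hB]
    refine ⟨hp1, insert_perm_snoc s2 s x hp2 hs2, hs1, insert_sorted s2 x hs2, by simp [hlen], ?_, ?_⟩
    · rw [zip_snoc pre fl x false hlen, List.filter_append, List.map_append]
      simp [← hf]
    · rw [zip_snoc pre fl x false hlen, List.filter_append, List.map_append]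
      simp [← hsnd]


theorem fold_inv (rest : List Int) (stA : List Int × List Int)
    (stB : List Bool × List Int × List Int) (pre : List Int) (h : LoopInv stA stB pre) :
    LoopInv (rest.foldl solutionStepA stA) (rest.foldl solutionStepB stB) (pre ++ rest) := by
  induction rest generalizing stA stB pre with
  | nil => simpa using h
  | cons y t ih =>
    rw [List.foldl_cons, List.foldl_cons]
    have := ih _ _ _ (step_inv stA stB pre y h)
    simpa using this

-- ===== VERDICT (by name: the statement is the Claim_ definition above) =====
theorem solution_spec : Claim_equal_solution := by
  intro numbers hdom hpre
  unfold Spec_solution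
  match numbers with
  | [] => simp [Pre_solution] at hpre
  | [a] => simp [Pre_solution] at hpre
  | a :: b :: rest =>
    rw [solution, solution_alt]
    have h0 : LoopInv ([a], [b]) ([true, false], [a], [b]) [a, b] := by
      refine ⟨List.Perm.refl _, List.Perm.refl _, by simp, by simp, by simp, by simp, by simp⟩
    have h := fold_inv rest ([a], [b]) ([true, false], [a], [b]) [a, b] h0
    obtain ⟨-, -, -, -, -, h1, h2⟩ := h
    rw [h1, h2]
    simp
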